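/- GENERATED by farm/mkstatement.py from design/units.tsv (unit `put_header`) and the Specs of Vorbis/Spec/*.lean — do not edit.
   THE STATEMENT of the proof unit `put_header`: the function `put_header` (45 instructions) satisfies its contract,
   given the contracts of its callees. What the names mean: Vorbis/Spec/Basic.lean. The theorem to prove:
   `theorem put_header_ok : Vorbis.Spec.put_header.Statement`. -/
import Vorbis.Spec.Top
namespace Vorbis.Spec.put_header
open X86 X86.User Asan

/-- The statement of unit `put_header`. -/
def Statement : Prop :=
  ∀ (Lay : Layout) (_hLay : Lay.hi = 0x1000000) (μ : Microarch) (_hμ : UserX.MicroOK μ) (u₀ : State)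
    (_hcode : HasCodeNat Lay u₀ Vorbis.L.put_header.entry Vorbis.Code.code_put_header.nat Vorbis.L.put_header.size)
    (_h_asan_store4_noabort : Asan.SmallCheck Lay μ Vorbis.WayInv (Vorbis.CodeOK u₀) [.rax, .rcx, .rdx] 4 Vorbis.L.__asan_store4_noabort.entry),
    ∀ (others : List Obj) (frames : List (Nat × FrameLayout)), Calls Lay μ Vorbis.WayInv (Vorbis.conv u₀) Vorbis.L.put_header.entry (Vorbis.Spec.put_header.spec others frames)

end Vorbis.Spec.put_header
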